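-- pv_equiv track=rewrite | github.com/skundu42/friday | src-tauri/resources/litert-python/macos-aarch64/worker/friday_litert_worker.py | stream_text_delta
-- ===== SOURCE A (Python) =====
-- def should_insert_text_separator(previous_text: str, next_text: str) -> bool:
--     if not previous_text or not next_text:
--         return False
--
--     previous_last = previous_text[-1]
--     next_first = next_text[0]
--
--     if previous_last.isspace() or next_first.isspace():
--         return False
--     if next_first in ",.;:!?)]}>\"'`":
--         return False
--     if previous_last in "([{<\"'`":
--         return False
--     if next_first in "#-*`~>":
--         return False
--
--     # Low-risk separator insertion only for structural boundary cases.
--     if previous_last in ".!?:;" and next_first.isupper():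
--         return True
--
--     if previous_last.islower() and next_first.isupper():
--         return True
--
--     if previous_last.isdigit() and next_first.isupper():
--         return True
--
--     return False
--
-- def suffix_prefix_overlap(previous_text: str, current_text: str) -> int:
--     max_overlap = min(len(previous_text), len(current_text))
--     for overlap in range(max_overlap, 0, -1):
--         if previous_text.endswith(current_text[:overlap]):
--             return overlap
--     return 0
--
-- def stream_text_delta(previous_text: str, current_text: str) -> tuple[str, str]:
--     if not current_text:
--         return "", previous_text
--     if not previous_text:
--         return current_text, current_text
--     if current_text == previous_text:
--         return "", previous_text
--     if current_text.startswith(previous_text):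
--         return current_text[len(previous_text) :], current_text
--
--     common_prefix_len = 0
--     max_prefix = min(len(previous_text), len(current_text))
--     while (
--         common_prefix_len < max_prefix
--         and previous_text[common_prefix_len] == current_text[common_prefix_len]
--     ):
--         common_prefix_len += 1
--
--     if (
--         common_prefix_len >= 8
--         and common_prefix_len >= len(previous_text) // 2
--         and len(current_text) >= len(previous_text)
--     ):
--         return current_text[common_prefix_len:], current_text
--
--     overlap = suffix_prefix_overlap(previous_text, current_text)
--     if overlap > 0:
--         delta = current_text[overlap:]
--         return delta, previous_text + delta
--
--     separator = " " if should_insert_text_separator(previous_text, current_text) else ""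
--     return f"{separator}{current_text}", f"{previous_text}{separator}{current_text}"
-- ===== SOURCE B (Python) =====
-- # B: same delta logic, but the suffix/prefix overlap is found with rolling hashes
-- # (prefix hashes of current, suffix hashes of previous), so each candidate length
-- # is tested in O(1) instead of O(k) slicing+endswith; matches are verified exactly.
--
-- _MOD = (1 << 61) - 1
-- _BASE = 131
--
--
-- def should_insert_text_separator(previous_text: str, next_text: str) -> bool:
--     if not previous_text or not next_text:
--         return False
--     p = previous_text[-1]
--     n = next_text[0]
--     if (p.isspace() or n.isspace() or n in ",.;:!?)]}>\"'`"
--             or p in "([{<\"'`" or n in "#-*`~>"):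
--         return False
--     return n.isupper() and (p in ".!?:;" or p.islower() or p.isdigit())
--
--
-- def suffix_prefix_overlap(previous_text: str, current_text: str) -> int:
--     lp = len(previous_text)
--     m = min(lp, len(current_text))
--     hpre = [0] * (m + 1)   # hash of current_text[:k]
--     hsuf = [0] * (m + 1)   # hash of previous_text[lp-k:]
--     pw = 1
--     for k in range(m):
--         hpre[k + 1] = (hpre[k] * _BASE + ord(current_text[k])) % _MOD
--         hsuf[k + 1] = (ord(previous_text[lp - k - 1]) * pw + hsuf[k]) % _MOD
--         pw = pw * _BASE % _MOD
--     for k in range(m, 0, -1):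
--         if hpre[k] == hsuf[k] and previous_text[lp - k:] == current_text[:k]:
--             return k
--     return 0
--
--
-- def stream_text_delta(previous_text: str, current_text: str) -> tuple[str, str]:
--     if not current_text:
--         return "", previous_text
--     if not previous_text:
--         return current_text, current_text
--     if current_text == previous_text:
--         return "", previous_text
--     if current_text.startswith(previous_text):
--         return current_text[len(previous_text):], current_text
--
--     common_prefix_len = 0
--     for a, b in zip(previous_text, current_text):
--         if a != b:
--             break
--         common_prefix_len += 1
--
--     if (common_prefix_len >= 8
--             and common_prefix_len >= len(previous_text) // 2
--             and len(current_text) >= len(previous_text)):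
--         return current_text[common_prefix_len:], current_text
--
--     overlap = suffix_prefix_overlap(previous_text, current_text)
--     if overlap > 0:
--         delta = current_text[overlap:]
--         return delta, previous_text + delta
--
--     sep = " " if should_insert_text_separator(previous_text, current_text) else ""
--     return sep + current_text, previous_text + sep + current_text
-- ===== Notes on version B (the rewrite author's own statement) =====
-- stated objective: faster
-- what changed: The longest suffix/prefix overlap is found with precomputed rolling hashes (prefix hashes of current, suffix hashes of previous) so each candidate length is tested in O(1) with exact verification only on hash match, instead of A's descending scan that slices and endswith-compares at every length; the common-prefix while loop becomes a zip/takewhile and the separator helper a single factored boolean.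
import Mathlib
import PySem

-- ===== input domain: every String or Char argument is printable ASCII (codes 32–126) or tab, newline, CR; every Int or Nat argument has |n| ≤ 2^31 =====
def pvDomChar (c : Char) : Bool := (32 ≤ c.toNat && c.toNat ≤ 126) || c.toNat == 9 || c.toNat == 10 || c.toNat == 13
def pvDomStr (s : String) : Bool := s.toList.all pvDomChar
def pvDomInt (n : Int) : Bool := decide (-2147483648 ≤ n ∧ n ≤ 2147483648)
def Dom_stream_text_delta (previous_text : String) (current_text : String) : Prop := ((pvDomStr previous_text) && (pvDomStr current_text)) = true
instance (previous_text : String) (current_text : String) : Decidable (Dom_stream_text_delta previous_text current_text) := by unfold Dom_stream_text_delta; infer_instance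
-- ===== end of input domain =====

-- B replaces A's quadratic descending endswith-scan for the longest suffix/prefix overlap by
-- rolling hashes (O(1) candidate test, exact verification on hash match); equivalence proved on all inputs.


-- ===== PORT A =====

-- should_insert_text_separator, A's sequential-if form (previous_text[-1] / next_text[0] via pyGet?)
def pvSepA (p n : List Char) : Bool :=
  if p.isEmpty || n.isEmpty then false
  else
    match PySem.List.pyGet? p (-1), PySem.List.pyGet? n 0 with
    | some pl, some nf =>
      if PySem.Chars.isspace pl || PySem.Chars.isspace nf then false
      else if PySem.Chars.isIn [nf] ",.;:!?)]}>\"'`".toList then false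
      else if PySem.Chars.isIn [pl] "([{<\"'`".toList then false
      else if PySem.Chars.isIn [nf] "#-*`~>".toList then false
      else if PySem.Chars.isIn [pl] ".!?:;".toList && PySem.Chars.isupper nf then true
      else if PySem.Chars.islower pl && PySem.Chars.isupper nf then true
      else if PySem.Chars.isdigit pl && PySem.Chars.isupper nf then true
      else false
    | _, _ => false

-- suffix_prefix_overlap's loop: for overlap in range(max,0,-1); c[:overlap] with 0 ≤ overlap is List.take
def pvSpoA (p c : List Char) : Nat → Nat
  | 0 => 0
  | k+1 => if PySem.Chars.endswith p (c.take (k+1)) then k+1 else pvSpoA p c k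

-- the common-prefix while loop; fuel = maxPrefix - i keeps the i < maxPrefix guard, indices in range
def pvCplA (p c : List Char) (i : Nat) : Nat → Nat
  | 0 => i
  | f+1 => if getElem? p i = getElem? c i then pvCplA p c (i+1) f else i

def stream_text_delta (previous_text : String) (current_text : String) : List String :=
  let p := previous_text.toList
  let c := current_text.toList
  if c.isEmpty then [String.ofList [], String.ofList p]
  else if p.isEmpty then [String.ofList c, String.ofList c]
  else if c = p then [String.ofList [], String.ofList p]
  else if PySem.Chars.startswith c p then [String.ofList (c.drop p.length), String.ofList c]
  else
    -- cpl / overlap / sep are the Python locals, inlined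
    if 8 ≤ pvCplA p c 0 (min p.length c.length) ∧ p.length / 2 ≤ pvCplA p c 0 (min p.length c.length) ∧ p.length ≤ c.length then
      [String.ofList (c.drop (pvCplA p c 0 (min p.length c.length))), String.ofList c]
    else
      if 0 < pvSpoA p c (min p.length c.length) then
        [String.ofList (c.drop (pvSpoA p c (min p.length c.length))), String.ofList (p ++ c.drop (pvSpoA p c (min p.length c.length)))]
      else
        [String.ofList ((if pvSepA p c then [' '] else []) ++ c), String.ofList (p ++ (if pvSepA p c then [' '] else []) ++ c)]

-- ===== PORT B =====

def pvMOD : Int := 2305843009213693951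
def pvBASE : Int := 131

-- B's factored boolean form of should_insert_text_separator
def pvSepB (p n : List Char) : Bool :=
  if p.isEmpty || n.isEmpty then false
  else
    match PySem.List.pyGet? p (-1), PySem.List.pyGet? n 0 with
    | some pl, some nf =>
      if PySem.Chars.isspace pl || PySem.Chars.isspace nf
         || PySem.Chars.isIn [nf] ",.;:!?)]}>\"'`".toList
         || PySem.Chars.isIn [pl] "([{<\"'`".toList
         || PySem.Chars.isIn [nf] "#-*`~>".toList then false
      else PySem.Chars.isupper nf &&
           (PySem.Chars.isIn [pl] ".!?:;".toList || PySem.Chars.islower pl || PySem.Chars.isdigit pl)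
    | _, _ => false

-- the hash-building for-loop: after k steps, hpre/hsuf hold entries 0..k and pw = BASE^k mod MOD
-- (Python writes hpre[k+1] into a preallocated list; appending builds the same list)
def pvHashes (p c : List Char) (lp : Nat) : Nat → List Int × List Int × Int
  | 0 => ([0], [0], 1)
  | k+1 =>
    let s := pvHashes p c lp k
    (s.1 ++ [PySem.Int.mod (s.1.getLastD 0 * pvBASE + ((c.getD k ' ').toNat : Int)) pvMOD],
     s.2.1 ++ [PySem.Int.mod (((p.getD (lp - k - 1) ' ').toNat : Int) * s.2.2 + s.2.1.getLastD 0) pvMOD],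
     PySem.Int.mod (s.2.2 * pvBASE) pvMOD)

-- the descending verify loop: hash compare, then exact slice compare on hash match
def pvSpoBLoop (p c : List Char) (h1 h2 : List Int) (lp : Nat) : Nat → Nat
  | 0 => 0
  | k+1 =>
    if h1.getD (k+1) 0 = h2.getD (k+1) 0 ∧ p.drop (lp - (k+1)) = c.take (k+1)
    then k+1 else pvSpoBLoop p c h1 h2 lp k

-- lp / m / (hpre, hsuf, _) are the Python locals, inlined
def pvSpoB (p c : List Char) : Nat :=
  pvSpoBLoop p c (pvHashes p c p.length (min p.length c.length)).1
    (pvHashes p c p.length (min p.length c.length)).2.1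
    p.length (min p.length c.length)

def stream_text_delta_alt (previous_text : String) (current_text : String) : List String :=
  let p := previous_text.toList
  let c := current_text.toList
  if c.isEmpty then [String.ofList [], String.ofList p]
  else if p.isEmpty then [String.ofList c, String.ofList c]
  else if c = p then [String.ofList [], String.ofList p]
  else if PySem.Chars.startswith c p then [String.ofList (c.drop p.length), String.ofList c]
  else
    -- cpl (common prefix via zip/takewhile) / overlap / sep are the Python locals, inlined
    if 8 ≤ ((p.zip c).takeWhile (fun ab => ab.1 == ab.2)).length ∧ p.length / 2 ≤ ((p.zip c).takeWhile (fun ab => ab.1 == ab.2)).length ∧ p.length ≤ c.length then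
      [String.ofList (c.drop (((p.zip c).takeWhile (fun ab => ab.1 == ab.2)).length)), String.ofList c]
    else
      if 0 < pvSpoB p c then
        [String.ofList (c.drop (pvSpoB p c)), String.ofList (p ++ c.drop (pvSpoB p c))]
      else
        [String.ofList ((if pvSepB p c then [' '] else []) ++ c), String.ofList (p ++ (if pvSepB p c then [' '] else []) ++ c)]

-- ===== PRECONDITION & SPEC =====
def Spec_stream_text_delta (previous_text : String) (current_text : String) (out : List String) : Prop := out = stream_text_delta_alt previous_text current_text
instance (previous_text : String) (current_text : String) (out : List String) : Decidable (Spec_stream_text_delta previous_text current_text out) := by unfold Spec_stream_text_delta; infer_instance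

-- ===== CLAIM (what is proved, stated in full; the proofs are below) =====
def Claim_equal_stream_text_delta : Prop := ∀ (previous_text : String) (current_text : String), Dom_stream_text_delta previous_text current_text → Spec_stream_text_delta previous_text current_text (stream_text_delta previous_text current_text)

-- ===== LEMMAS AND PROOFS =====

-- the boolean identity behind the two separator helpers
lemma pvSepChain : ∀ (b1 b2 b3 b4 b5 b6 b7 b8 b9 : Bool),
    (if b1 || b2 || b3 || b4 || b5 then false else b9 && (b6 || b7 || b8)) =
    (if b1 || b2 then false
     else if b3 then false
     else if b4 then false
     else if b5 then false
     else if b6 && b9 then true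
     else if b7 && b9 then true
     else if b8 && b9 then true
     else false) := by decide

-- the two separator helpers agree
lemma pvSep_eq (p n : List Char) : pvSepB p n = pvSepA p n := by
  unfold pvSepA pvSepB
  by_cases hpe : (p.isEmpty || n.isEmpty) = true
  · rw [if_pos hpe, if_pos hpe]
  · rw [if_neg hpe, if_neg hpe]
    cases PySem.List.pyGet? p (-1) <;> cases PySem.List.pyGet? n 0
    · rfl
    · rfl
    · rfl
    · exact pvSepChain _ _ _ _ _ _ _ _ _

-- the polynomial hash of a list (no modulus; the ports reduce mod pvMOD at each step)
def pvPoly (l : List Char) : Int := l.foldl (fun h ch => h * pvBASE + ((ch.toNat : Int))) 0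

lemma pvPoly_foldl : ∀ (l : List Char) (a : Int),
    l.foldl (fun h ch => h * pvBASE + ((ch.toNat : Int))) a = a * pvBASE ^ l.length + pvPoly l := by
  intro l
  induction l with
  | nil => intro a; simp [pvPoly]
  | cons ch l ih =>
    intro a
    have h2 : pvPoly (ch :: l) = (0 * pvBASE + ((ch.toNat : Int))) * pvBASE ^ l.length + pvPoly l := by
      show List.foldl _ _ (ch :: l) = _
      rw [List.foldl_cons, ih]
    rw [List.foldl_cons, ih, h2, List.length_cons]
    ring

lemma pvPoly_cons (ch : Char) (l : List Char) :
    pvPoly (ch :: l) = (ch.toNat : Int) * pvBASE ^ l.length + pvPoly l := by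
  show List.foldl _ _ (ch :: l) = _
  rw [List.foldl_cons, pvPoly_foldl]
  ring

lemma pvPoly_concat (l : List Char) (ch : Char) :
    pvPoly (l ++ [ch]) = pvPoly l * pvBASE + (ch.toNat : Int) := by
  unfold pvPoly
  rw [List.foldl_append]
  rfl

lemma pvModStep (a b d M : Int) : (a % M * b + d) % M = (a * b + d) % M := by
  conv_lhs => rw [Int.add_emod, Int.mul_emod, Int.emod_emod_of_dvd _ dvd_rfl]
  conv_rhs => rw [Int.add_emod, Int.mul_emod]

lemma pvModStep2 (d e f M : Int) : (d * (e % M) + f % M) % M = (d * e + f) % M := by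
  conv_lhs => rw [Int.add_emod, Int.mul_emod, Int.emod_emod_of_dvd _ dvd_rfl,
    Int.emod_emod_of_dvd _ dvd_rfl]
  conv_rhs => rw [Int.add_emod, Int.mul_emod]

lemma pvMOD_pos : (0 : Int) < pvMOD := by unfold pvMOD; norm_num

lemma pvMod_eq (x : Int) : PySem.Int.mod x pvMOD = x % pvMOD :=
  PySem.Int.mod_eq_emod_of_pos pvMOD_pos

lemma pvHashes_spec (p c : List Char) : ∀ (k : Nat), k ≤ min p.length c.length →
    pvHashes p c p.length k =
      ((List.range (k+1)).map (fun j => pvPoly (c.take j) % pvMOD),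
       (List.range (k+1)).map (fun j => pvPoly (p.drop (p.length - j)) % pvMOD),
       pvBASE ^ k % pvMOD) := by
  intro k
  induction k with
  | zero =>
    intro _
    unfold pvHashes
    have h1 : (1 : Int) % pvMOD = 1 := by decide
    have h0 : pvPoly [] = 0 := rfl
    simp only [List.range_succ, List.range_zero, List.map_nil, List.nil_append, List.map_cons,
      List.take_zero, Nat.sub_zero, List.drop_length, h0, Int.zero_emod, pow_zero, h1]
  | succ k ih =>
    intro hk
    have hk' : k ≤ min p.length c.length := by omega
    have hkc : k < c.length := by omega
    have hkp : p.length - k - 1 < p.length := by omega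
    unfold pvHashes
    rw [ih hk']
    dsimp only
    simp only [pvMod_eq, Prod.mk.injEq]
    refine ⟨?_, ?_, ?_⟩
    · conv_rhs => rw [List.range_succ (n := k+1), List.map_append]
      congr 1
      have hlast : (List.map (fun j => pvPoly (c.take j) % pvMOD) (List.range (k+1))).getLastD 0 =
          pvPoly (c.take k) % pvMOD := by
        rw [List.range_succ, List.map_append]; simp
      rw [hlast, pvModStep, List.getD_eq_getElem c ' ' hkc]
      have htake : c.take (k+1) = c.take k ++ [getElem c k hkc] := by
        rw [List.take_add_one, List.getElem?_eq_getElem hkc]; rfl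
      simp only [List.map_cons, List.map_nil, htake, pvPoly_concat]
    · conv_rhs => rw [List.range_succ (n := k+1), List.map_append]
      congr 1
      have hlast : (List.map (fun j => pvPoly (p.drop (p.length - j)) % pvMOD) (List.range (k+1))).getLastD 0 =
          pvPoly (p.drop (p.length - k)) % pvMOD := by
        rw [List.range_succ, List.map_append]; simp
      rw [hlast, pvModStep2, List.getD_eq_getElem p ' ' hkp]
      have hdrop : p.drop (p.length - (k+1)) = getElem p (p.length - k - 1) hkp :: p.drop (p.length - k) := by
        have h1 : p.length - (k+1) = p.length - k - 1 := by omega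
        have h2 : p.length - k - 1 + 1 = p.length - k := by omega
        rw [h1, List.drop_eq_getElem_cons hkp, h2]
      have hlen : (p.drop (p.length - k)).length = k := by
        rw [List.length_drop]; omega
      simp only [List.map_cons, List.map_nil]
      rw [hdrop, pvPoly_cons, hlen]
    · conv_lhs => rw [Int.mul_emod, Int.emod_emod_of_dvd _ dvd_rfl, ← Int.mul_emod]
      rw [pow_succ]

lemma pvCplA_spec (p c : List Char) :
    ∀ (f i : Nat), i + f = min p.length c.length →
      pvCplA p c i f = i + (((p.drop i).zip (c.drop i)).takeWhile (fun ab => ab.1 == ab.2)).length := by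
  intro f
  induction f with
  | zero =>
    intro i hi
    have h : p.length ≤ i ∨ c.length ≤ i := by omega
    rcases h with h | h
    · rw [List.drop_eq_nil_of_le h]; simp [pvCplA]
    · rw [List.drop_eq_nil_of_le (show c.length ≤ i from h)]; simp [pvCplA]
  | succ f ih =>
    intro i hi
    have hip : i < p.length := by omega
    have hic : i < c.length := by omega
    rw [List.drop_eq_getElem_cons hip, List.drop_eq_getElem_cons hic]
    unfold pvCplA
    rw [List.getElem?_eq_getElem hip, List.getElem?_eq_getElem hic]
    by_cases heq : getElem p i hip = getElem c i hic
    · rw [if_pos (by rw [heq]), List.zip_cons_cons,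
        List.takeWhile_cons_of_pos (by simpa using heq), ih (i+1) (by omega)]
      simp only [List.length_cons]
      omega
    · rw [if_neg (by simpa using heq), List.zip_cons_cons,
        List.takeWhile_cons_of_neg (by simpa using heq)]
      simp

lemma pvCplA_zero (p c : List Char) :
    pvCplA p c 0 (min p.length c.length) = ((p.zip c).takeWhile (fun ab => ab.1 == ab.2)).length := by
  simpa using pvCplA_spec p c (min p.length c.length) 0 (by omega)

lemma pvSpoBLoop_eq (p c : List Char) (m : Nat) :
    ∀ k, k ≤ m → k ≤ min p.length c.length →
    pvSpoBLoop p c ((List.range (m+1)).map fun j => pvPoly (c.take j) % pvMOD)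
                   ((List.range (m+1)).map fun j => pvPoly (p.drop (p.length - j)) % pvMOD)
                   p.length k = pvSpoA p c k := by
  intro k
  induction k with
  | zero => intro _ _; rfl
  | succ k ih =>
    intro hk hk2
    have hlt : k + 1 < m + 1 := by omega
    have hgd1 : ((List.range (m+1)).map fun j => pvPoly (c.take j) % pvMOD).getD (k+1) 0 =
        pvPoly (c.take (k+1)) % pvMOD := by
      rw [List.getD_eq_getElem?_getD, List.getElem?_map, List.getElem?_range hlt]
      rfl
    have hgd2 : ((List.range (m+1)).map fun j => pvPoly (p.drop (p.length - j)) % pvMOD).getD (k+1) 0 =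
        pvPoly (p.drop (p.length - (k+1))) % pvMOD := by
      rw [List.getD_eq_getElem?_getD, List.getElem?_map, List.getElem?_range hlt]
      rfl
    have hlen : (c.take (k+1)).length = k + 1 := by
      rw [List.length_take]; omega
    have hcond : (((List.range (m+1)).map fun j => pvPoly (c.take j) % pvMOD).getD (k+1) 0 =
          ((List.range (m+1)).map fun j => pvPoly (p.drop (p.length - j)) % pvMOD).getD (k+1) 0 ∧
          p.drop (p.length - (k+1)) = c.take (k+1)) ↔
        PySem.Chars.endswith p (c.take (k+1)) = true := by
      rw [hgd1, hgd2, PySem.Chars.endswith_iff]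
      constructor
      · rintro ⟨_, hdrop⟩
        rw [← hdrop]
        exact List.drop_suffix _ _
      · intro hsuf
        have hdrop : p.drop (p.length - (k+1)) = c.take (k+1) := by
          have h := List.suffix_iff_eq_drop.mp hsuf
          rw [hlen] at h
          exact h.symm
        exact ⟨by rw [hdrop], hdrop⟩
    unfold pvSpoBLoop pvSpoA
    by_cases hA : PySem.Chars.endswith p (c.take (k+1)) = true
    · rw [if_pos (hcond.mpr hA), if_pos hA]
    · rw [if_neg (fun h => hA (hcond.mp h)), if_neg hA]
      exact ih (by omega) (by omega)

lemma pvSpoB_eq (p c : List Char) : pvSpoB p c = pvSpoA p c (min p.length c.length) := by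
  unfold pvSpoB
  rw [pvHashes_spec p c (min p.length c.length) le_rfl]
  exact pvSpoBLoop_eq p c (min p.length c.length) (min p.length c.length) le_rfl le_rfl

theorem main_eq (previous_text current_text : String) :
    stream_text_delta previous_text current_text = stream_text_delta_alt previous_text current_text := by
  simp only [stream_text_delta, stream_text_delta_alt, pvSep_eq, pvSpoB_eq, pvCplA_zero]

-- ===== VERDICT (by name: the statement is the Claim_ definition above) =====
theorem stream_text_delta_spec : Claim_equal_stream_text_delta := by
  intro p c _
  unfold Spec_stream_text_delta
  exact main_eq p c
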